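-- pv_equiv track=rewrite | github.com/onejaejae/learn_datastructure | 토스 코테/1.멋쟁이 숫자.py | solution
-- ===== SOURCE A (Python) =====
-- def solution(s):
--     i = 0
--     max = -216000
--
--
--     while i < len(s) -2:
--         if s[i] == s[i+1] and s[i+1] == s[i+2] and s[i] == s[i+2]:
--             if max < int(s[i:i+3]):
--                 max = int(s[i:i+3])
--         i+=1
--
--     if max == -216000:
--         return -1
--     elif max == 000:
--         return 0
--     else:
--         return max
-- ===== SOURCE B (Python) =====
-- def solution(s):
--     best = None
--     i, n = 0, len(s)
--     while i < n:
--         j = i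
--         while j < n and s[j] == s[i]:
--             j += 1
--         if j - i >= 3:
--             v = int(s[i] * 3)
--             if best is None or v > best:
--                 best = v
--         i = j
--     return -1 if best is None else best
-- ===== Notes on version B (the rewrite author's own statement) =====
-- stated objective: alternative
-- what changed: A slides a 3-char window over the string and re-checks equality at every position; B decomposes the string into maximal runs of identical characters and produces one candidate int(c*3) per run of length >= 3, keeping the running maximum in an Optional instead of a sentinel constant.
import Mathlib
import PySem

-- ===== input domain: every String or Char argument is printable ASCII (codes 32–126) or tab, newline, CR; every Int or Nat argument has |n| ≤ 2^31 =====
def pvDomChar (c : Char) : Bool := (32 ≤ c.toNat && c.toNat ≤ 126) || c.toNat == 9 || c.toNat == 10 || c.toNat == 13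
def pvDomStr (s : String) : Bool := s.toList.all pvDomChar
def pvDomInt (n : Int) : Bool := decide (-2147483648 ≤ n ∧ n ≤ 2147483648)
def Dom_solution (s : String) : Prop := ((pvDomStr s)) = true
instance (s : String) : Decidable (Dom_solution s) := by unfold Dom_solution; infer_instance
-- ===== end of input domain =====

-- B replaces A's sliding 3-char window scan with a run-length decomposition (scan maximal runs
-- of identical chars, one candidate per run of length ≥ 3); objective: alternative.

-- ===== PORT A =====
-- A's while loop (reads s[i], s[i+1], s[i+2], then i += 1) as the structural recursion that
-- consumes one char per iteration; s[i:i+3] is String.ofList [a,b,c]; int(...) is PySem.Int.ofStr?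
-- (.getD 0 is never reached inside Pre_, which excludes the ValueError inputs).
def solutionLoop : List Char → Int → Int
  | a :: b :: c :: rest, m =>
      if a == b && b == c && a == c then
        let v := (PySem.Int.ofStr? (String.ofList [a, b, c])).getD 0
        solutionLoop (b :: c :: rest) (if m < v then v else m)
      else solutionLoop (b :: c :: rest) m
  | _, m => m

def solution (s : String) : Int :=
  let m := solutionLoop s.toList (-216000)
  if m = -216000 then -1 else if m = 0 then 0 else m

-- ===== PORT B =====
-- Source B's outer loop: each step consumes one maximal run (inner scan = takeWhile/dropWhile),
-- contributes int(c*3) if the run has length ≥ 3, and keeps the running maximum in `best`.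
def solutionAltLoop : List Char → Option Int → Option Int
  | [], best => best
  | c :: rest, best =>
      solutionAltLoop (rest.dropWhile (· == c))
        (if (rest.takeWhile (· == c)).length + 1 ≥ 3 then
           match best with
           | none => some ((PySem.Int.ofStr? (String.ofList [c, c, c])).getD 0)
           | some b =>
               if (PySem.Int.ofStr? (String.ofList [c, c, c])).getD 0 > b then
                 some ((PySem.Int.ofStr? (String.ofList [c, c, c])).getD 0)
               else some b
         else best)
  termination_by l _ => l.length
  decreasing_by
    simp only [List.length_cons]
    exact Nat.lt_succ_of_le (List.dropWhile_sublist (p := (· == c)) (l := rest)).length_le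

def solution_alt (s : String) : Int :=
  (solutionAltLoop s.toList none).getD (-1)

-- ===== PRECONDITION & SPEC =====
-- Pre_ excludes exactly the strings containing three consecutive identical non-digit
-- characters: there both A and B raise ValueError (int() of a non-numeric 3-char string).
def Pre_solution (s : String) : Prop :=
  (s.toList.all (fun c => !(PySem.Chars.isIn [c, c, c] s.toList) || c.isDigit)) = true
instance (s : String) : Decidable (Pre_solution s) := by unfold Pre_solution; infer_instance

def pvWitness_solution : String := "777"

def Spec_solution (s : String) (out : Int) : Prop := out = solution_alt s
instance (s : String) (out : Int) : Decidable (Spec_solution s out) := by unfold Spec_solution; infer_instance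

-- ===== CLAIM (what is proved, stated in full; the proofs are below) =====
def Claim_equal_solution : Prop := ∀ (s : String), Dom_solution s → Pre_solution s → Spec_solution s (solution s)

-- ===== LEMMAS AND PROOFS =====

-- the candidate value int("ccc") (0 when int() would raise; Pre_ keeps us in the digit case)
theorem pv_digit_mem (c : Char) (h : c.isDigit = true) :
    c ∈ ['0','1','2','3','4','5','6','7','8','9'] := by
  have h0 : 48 ≤ c.toNat ∧ c.toNat ≤ 57 := by
    simp [Char.isDigit, UInt32.le_iff_toNat_le] at h
    exact ⟨h.1, h.2⟩
  have hc : c = Char.ofNat c.toNat := (Char.ofNat_toNat c).symm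
  obtain ⟨h1, h2⟩ := h0
  interval_cases h' : c.toNat <;> rw [hc] <;> decide

theorem pv_cand_nonneg (c : Char) (h : c.isDigit = true) :
    (0 : Int) ≤ (PySem.Int.ofStr? (String.ofList [c, c, c])).getD 0 := by
  have hm := pv_digit_mem c h
  fin_cases hm <;> decide

-- ---- A's window scan over one maximal run ----

theorem pv_run1 (c : Char) (rest : List Char) (m : Int) (h : rest.head? ≠ some c) :
    solutionLoop (c :: rest) m = solutionLoop rest m := by
  match rest with
  | [] => rfl
  | [r] => rfl
  | r :: r2 :: t =>
      have hrc : (c == r) = false := by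
        simp only [beq_eq_false_iff_ne, ne_eq]
        rintro rfl; exact h rfl
      simp [solutionLoop, hrc]

theorem pv_run2 (c : Char) (rest : List Char) (m : Int) (h : rest.head? ≠ some c) :
    solutionLoop (c :: c :: rest) m = solutionLoop rest m := by
  match rest with
  | [] => rfl
  | r :: t =>
      have hrc : (c == r) = false := by
        simp only [beq_eq_false_iff_ne, ne_eq]
        rintro rfl; exact h rfl
      have h1 : (r :: t).head? ≠ some c := by
        simp only [List.head?_cons, ne_eq, Option.some.injEq]
        intro hrc2; rw [hrc2] at hrc; simp at hrc
      simp only [solutionLoop, hrc, Bool.and_false, Bool.and_self, beq_self_eq_true]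
      exact pv_run1 c (r :: t) m h1

theorem pv_runA (c : Char) (rest' : List Char) (h : rest'.head? ≠ some c) :
    ∀ (k : Nat) (m : Int),
      solutionLoop (List.replicate (k + 3) c ++ rest') m
        = solutionLoop rest'
            (if m < (PySem.Int.ofStr? (String.ofList [c, c, c])).getD 0 then
               (PySem.Int.ofStr? (String.ofList [c, c, c])).getD 0 else m) := by
  intro k
  induction k with
  | zero =>
      intro m
      show solutionLoop (c :: c :: c :: rest') m = _
      rw [solutionLoop]
      simp only [beq_self_eq_true, Bool.and_self, if_true]
      exact pv_run2 c rest' _ h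
  | succ n ih =>
      intro m
      have hsh : List.replicate (n + 1 + 3) c ++ rest'
          = c :: c :: c :: (List.replicate (n + 1) c ++ rest') := by
        simp [List.replicate_succ]
      rw [hsh, solutionLoop]
      simp only [beq_self_eq_true, Bool.and_self, if_true]
      have hsh2 : c :: c :: (List.replicate (n + 1) c ++ rest')
          = List.replicate (n + 3) c ++ rest' := by
        simp [List.replicate_succ]
      rw [hsh2, ih]
      congr 1
      split_ifs <;> omega

-- ---- run decomposition facts ----

theorem pv_takeWhile_replicate (c : Char) (rest : List Char) :
    rest.takeWhile (· == c) = List.replicate (rest.takeWhile (· == c)).length c := by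
  rw [List.eq_replicate_iff]
  exact ⟨rfl, fun b hb => by
    have := List.mem_takeWhile_imp hb
    simpa using this⟩

theorem pv_decompose (c : Char) (rest : List Char) :
    c :: rest
      = List.replicate ((rest.takeWhile (· == c)).length + 1) c ++ rest.dropWhile (· == c) := by
  rw [List.replicate_succ]
  rw [← pv_takeWhile_replicate]
  simp [List.takeWhile_append_dropWhile]

theorem pv_head_dropWhile (c : Char) (rest : List Char) :
    (rest.dropWhile (· == c)).head? ≠ some c := by
  intro hh
  have := List.head?_dropWhile_not (· == c) rest
  rw [hh] at this
  simp at this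

-- ---- the main invariant: A's running max vs B's running best ----

theorem pv_main : ∀ (n : Nat) (l : List Char), l.length ≤ n →
    (∀ c : Char, [c, c, c] <:+: l → c.isDigit = true) →
    ∀ (best : Option Int) (m : Int),
      ((best = none ∧ m = -216000) ∨ ∃ b, best = some b ∧ m = b ∧ 0 ≤ b) →
      ((solutionAltLoop l best = none ∧ solutionLoop l m = -216000) ∨
        ∃ b, solutionAltLoop l best = some b ∧ solutionLoop l m = b ∧ 0 ≤ b) := by
  intro n
  induction n with
  | zero =>
      intro l hl _ best m hinv
      have hl0 : l = [] := List.length_eq_zero_iff.mp (Nat.le_zero.mp hl)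
      subst hl0
      rcases hinv with ⟨h1, h2⟩ | ⟨b, h1, h2, h3⟩
      · exact Or.inl ⟨by simp [solutionAltLoop, h1], by simp [solutionLoop, h2]⟩
      · exact Or.inr ⟨b, by simp [solutionAltLoop, h1], by simp [solutionLoop, h2], h3⟩
  | succ n ihn =>
      intro l hl hpre best m hinv
      rcases l with _ | ⟨c, rest⟩
      · rcases hinv with ⟨h1, h2⟩ | ⟨b, h1, h2, h3⟩
        · exact Or.inl ⟨by simp [solutionAltLoop, h1], by simp [solutionLoop, h2]⟩
        · exact Or.inr ⟨b, by simp [solutionAltLoop, h1], by simp [solutionLoop, h2], h3⟩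
      · have hdec := pv_decompose c rest
        have hhd := pv_head_dropWhile c rest
        have hlen : (rest.dropWhile (· == c)).length ≤ n := by
          have h1 : (rest.dropWhile (· == c)).length ≤ rest.length :=
            (List.dropWhile_sublist (p := (· == c)) (l := rest)).length_le
          have h2 : rest.length + 1 ≤ n + 1 := by simpa using hl
          omega
        have hsuf : (rest.dropWhile (· == c)) <:+ (c :: rest) :=
          (List.dropWhile_suffix _).trans (List.suffix_cons c rest)
        have hpre' : ∀ c' : Char, [c', c', c'] <:+: rest.dropWhile (· == c) → c'.isDigit = true :=
          fun c' hi => hpre c' (hi.trans hsuf.isInfix)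
        by_cases hk : (rest.takeWhile (· == c)).length + 1 ≥ 3
        · -- long run: a candidate is produced by both programs
          have hdig : c.isDigit = true := by
            apply hpre c
            have hpref : [c, c, c] <+: List.replicate ((rest.takeWhile (· == c)).length + 1) c := by
              have : List.replicate ((rest.takeWhile (· == c)).length + 1) c
                  = List.replicate 3 c
                    ++ List.replicate ((rest.takeWhile (· == c)).length + 1 - 3) c := by
                rw [← List.replicate_add]; congr 1; omega
              rw [this]
              exact ⟨_, rfl⟩
            rw [hdec]
            exact (hpref.trans (List.prefix_append _ _)).isInfix
          have hv0 : (0 : Int) ≤ (PySem.Int.ofStr? (String.ofList [c, c, c])).getD 0 :=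
            pv_cand_nonneg c hdig
          obtain ⟨j, hj⟩ : ∃ j, (rest.takeWhile (· == c)).length + 1 = j + 3 :=
            ⟨(rest.takeWhile (· == c)).length - 2, by omega⟩
          have hA : solutionLoop (c :: rest) m
              = solutionLoop (rest.dropWhile (· == c))
                  (if m < (PySem.Int.ofStr? (String.ofList [c, c, c])).getD 0 then
                     (PySem.Int.ofStr? (String.ofList [c, c, c])).getD 0 else m) := by
            rw [hdec, hj]
            exact pv_runA c _ hhd j m
          rcases hinv with ⟨h1, h2⟩ | ⟨b, h1, h2, h3⟩
          · subst h1; subst h2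
            have hB : solutionAltLoop (c :: rest) none
                = solutionAltLoop (rest.dropWhile (· == c))
                    (some ((PySem.Int.ofStr? (String.ofList [c, c, c])).getD 0)) := by
              rw [solutionAltLoop, if_pos hk]
            rw [hA, hB]
            apply ihn _ hlen hpre'
            right
            exact ⟨_, rfl, by rw [if_pos (by omega : (-216000 : Int) < _)], hv0⟩
          · subst h1
            by_cases hbv : b < (PySem.Int.ofStr? (String.ofList [c, c, c])).getD 0
            · have hmv : m < (PySem.Int.ofStr? (String.ofList [c, c, c])).getD 0 := by
                rw [h2]; exact hbv
              have hB : solutionAltLoop (c :: rest) (some b)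
                  = solutionAltLoop (rest.dropWhile (· == c))
                      (some ((PySem.Int.ofStr? (String.ofList [c, c, c])).getD 0)) := by
                rw [solutionAltLoop, if_pos hk]
                simp only [gt_iff_lt, if_pos hbv]
              rw [hA, hB]
              apply ihn _ hlen hpre'
              exact Or.inr ⟨_, rfl, if_pos hmv, hv0⟩
            · have hmv : ¬ m < (PySem.Int.ofStr? (String.ofList [c, c, c])).getD 0 := by
                rw [h2]; exact hbv
              have hB : solutionAltLoop (c :: rest) (some b)
                  = solutionAltLoop (rest.dropWhile (· == c)) (some b) := by
                rw [solutionAltLoop, if_pos hk]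
                simp only [gt_iff_lt, if_neg hbv]
              rw [hA, hB]
              apply ihn _ hlen hpre'
              exact Or.inr ⟨b, rfl, by rw [if_neg hmv, h2], h3⟩
        · -- short run (length 1 or 2): no candidate on either side
          have hA : solutionLoop (c :: rest) m = solutionLoop (rest.dropWhile (· == c)) m := by
            rcases Nat.lt_or_ge (rest.takeWhile (· == c)).length 1 with h1 | h1
            · have h0 : (rest.takeWhile (· == c)).length = 0 := by omega
              rw [hdec, h0]
              exact pv_run1 c _ m hhd
            · have h0 : (rest.takeWhile (· == c)).length = 1 := by omega
              rw [hdec, h0]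
              exact pv_run2 c _ m hhd
          rcases hinv with ⟨h1, h2⟩ | ⟨b, h1, h2, h3⟩
          · subst h1
            have hB : solutionAltLoop (c :: rest) none
                = solutionAltLoop (rest.dropWhile (· == c)) none := by
              rw [solutionAltLoop, if_neg hk]
            rw [hA, hB]
            exact ihn _ hlen hpre' none m (Or.inl ⟨rfl, h2⟩)
          · subst h1
            have hB : solutionAltLoop (c :: rest) (some b)
                = solutionAltLoop (rest.dropWhile (· == c)) (some b) := by
              rw [solutionAltLoop, if_neg hk]
            rw [hA, hB]
            exact ihn _ hlen hpre' _ m (Or.inr ⟨b, rfl, h2, h3⟩)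

-- ===== VERDICT (by name: the statement is the Claim_ definition above) =====
theorem solution_spec : Claim_equal_solution := by
  intro s _ hpre
  unfold Spec_solution solution solution_alt
  have hpre' : ∀ c : Char, [c, c, c] <:+: s.toList → c.isDigit = true := by
    intro c hi
    have hc : c ∈ s.toList := hi.sublist.mem (by simp)
    have h2 := List.all_eq_true.mp hpre c hc
    rcases Bool.or_eq_true_iff.mp h2 with h' | h'
    · exfalso
      have := (PySem.Chars.isIn_iff_infix _ _).mpr hi
      simp [this] at h'
    · exact h'
  have := pv_main s.toList.length s.toList le_rfl hpre' none (-216000) (Or.inl ⟨rfl, rfl⟩)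
  rcases this with ⟨h1, h2⟩ | ⟨b, h1, h2, h3⟩
  · simp [h1, h2]
  · rw [h1, h2]
    simp only [Option.getD_some]
    have hb : b ≠ -216000 := by omega
    by_cases hb0 : b = 0
    · simp [hb0]
    · simp [hb, hb0]
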